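-- pv_equiv track=rewrite | github.com/RocketDan53/defense-alpha | scrapers/sec_edgar.py | _sic_is_defense_relevant
-- ===== SOURCE A (Python) =====
-- DEFENSE_SIC_RANGES = [
--     (3720, 3729),  # Aircraft & parts
--     (3760, 3769),  # Guided missiles, space vehicles
--     (3812, 3812),  # Search/navigation equipment
--     (7370, 7379),  # Software & data processing
-- ]
--
-- def _sic_is_defense_relevant(sic_code: str) -> bool:
--     """Check if a SIC code falls within defense-relevant ranges."""
--     if not sic_code or not sic_code.strip():
--         return False
--     try:
--         code = int(sic_code.strip())
--     except ValueError:
--         return False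
--     return any(lo <= code <= hi for lo, hi in DEFENSE_SIC_RANGES)
-- ===== SOURCE B (Python) =====
-- def _sic_is_defense_relevant(sic_code: str) -> bool:
--     """Check if a SIC code falls within defense-relevant ranges."""
--     try:
--         code = int(sic_code.strip())
--     except ValueError:
--         return False
--     # Every defense range except 3812 is a full decade, so classify by the
--     # decade prefix (floor division) plus the one standalone code.
--     return code == 3812 or code // 10 in (372, 376, 737)
-- ===== Notes on version B (the rewrite author's own statement) =====
-- stated objective: simpler
-- what changed: The any() loop comparing the code against a list of (lo,hi) intervals is gone entirely: B classifies arithmetically by the code's decade prefix (code // 10 in {372, 376, 737}) plus the single standalone code 3812, and drops A's redundant empty/whitespace guard since int() raises ValueError there anyway.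
import Mathlib
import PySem

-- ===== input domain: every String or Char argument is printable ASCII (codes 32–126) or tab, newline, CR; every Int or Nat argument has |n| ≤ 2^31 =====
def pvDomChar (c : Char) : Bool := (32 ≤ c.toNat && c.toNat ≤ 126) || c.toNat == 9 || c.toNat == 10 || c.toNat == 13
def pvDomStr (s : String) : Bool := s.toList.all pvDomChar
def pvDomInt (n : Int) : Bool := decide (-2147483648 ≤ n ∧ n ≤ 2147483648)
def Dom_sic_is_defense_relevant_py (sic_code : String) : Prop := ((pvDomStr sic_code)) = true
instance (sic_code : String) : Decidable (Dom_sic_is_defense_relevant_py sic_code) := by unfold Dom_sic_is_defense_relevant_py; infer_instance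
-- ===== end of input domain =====

-- B drops A's interval-scan loop and redundant empty guard: it classifies by decade arithmetic (code // 10) plus one standalone code.

-- ===== PORT A =====
def DEFENSE_SIC_RANGES : List (Int × Int) := [(3720, 3729), (3760, 3769), (3812, 3812), (7370, 7379)]

def sic_is_defense_relevant_py (sic_code : String) : Bool :=
  if sic_code = "" || PySem.Str.strip sic_code = "" then false
  else
    match PySem.Int.ofStr? (PySem.Str.strip sic_code) with
    | none => false
    | some code => DEFENSE_SIC_RANGES.any (fun p => decide (p.1 ≤ code ∧ code ≤ p.2))

-- ===== PORT B =====
def sic_is_defense_relevant_py_alt (sic_code : String) : Bool :=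
  match PySem.Int.ofStr? (PySem.Str.strip sic_code) with
  | none => false
  | some code => code == 3812 || [(372 : Int), 376, 737].contains (PySem.Int.floordiv code 10)

-- ===== PRECONDITION & SPEC =====
def Spec_sic_is_defense_relevant_py (sic_code : String) (out : Bool) : Prop := out = sic_is_defense_relevant_py_alt sic_code
instance (sic_code : String) (out : Bool) : Decidable (Spec_sic_is_defense_relevant_py sic_code out) := by unfold Spec_sic_is_defense_relevant_py; infer_instance

-- ===== CLAIM =====
def Claim_equal_sic_is_defense_relevant_py : Prop := ∀ (sic_code : String), Dom_sic_is_defense_relevant_py sic_code → Spec_sic_is_defense_relevant_py sic_code (sic_is_defense_relevant_py sic_code)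

-- ===== LEMMAS AND PROOFS =====
theorem range_any_eq_decade (code : Int) :
    DEFENSE_SIC_RANGES.any (fun p => decide (p.1 ≤ code ∧ code ≤ p.2))
      = (code == 3812 || [(372 : Int), 376, 737].contains (PySem.Int.floordiv code 10)) := by
  have hf : PySem.Int.floordiv code 10 = code / 10 := by
    simp [PySem.Int.floordiv, Int.fdiv_eq_ediv]
  simp only [DEFENSE_SIC_RANGES, List.any_cons, List.any_nil, Bool.or_false, hf,
    List.contains_eq_mem, List.mem_cons, List.not_mem_nil, or_false]
  rw [Bool.eq_iff_iff]
  simp only [Bool.or_eq_true, decide_eq_true_eq, beq_iff_eq]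
  omega

theorem ofStr?_empty_of_strip_empty (s : String) (h : PySem.Str.strip s = "") :
    PySem.Int.ofStr? (PySem.Str.strip s) = none := by
  rw [h]; decide

-- ===== VERDICT =====
theorem sic_is_defense_relevant_py_spec : Claim_equal_sic_is_defense_relevant_py := by
  intro s _
  unfold Spec_sic_is_defense_relevant_py sic_is_defense_relevant_py sic_is_defense_relevant_py_alt
  split
  · rename_i h
    rcases (by simpa using h : s = "" ∨ PySem.Str.strip s = "") with hs | hs
    · subst hs; decide
    · rw [ofStr?_empty_of_strip_empty s hs]
  · cases PySem.Int.ofStr? (PySem.Str.strip s) with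
    | none => rfl
    | some code => exact range_any_eq_decade code
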